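-- pv_equiv track=rewrite | github.com/RobinYaoWenbin/Python-CommonCode | python算法/4.26如何对磁盘进行分区.py | is_allocable
-- ===== SOURCE A (Python) =====
-- def is_allocable(d , p):
--     while len(d) != 0 and len(p) != 0:  # 要么磁盘空间分配完了,要么分区全部成功分完了
--         if d[0] >= p[0]:
--             d[0] = d[0] - p[0]
--             del p[0]
--         elif d[0] < p[0]:
--             del d[0]
--     if len(d) == 0 and len(p) != 0:
--         return False
--     elif len(d) != 0 and len(p) == 0:
--         return True
--     else:
--         return True
-- ===== SOURCE B (Python) =====
-- def is_allocable(d, p):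
--     j = 0
--     for disk in d:
--         rem = disk
--         while j < len(p) and rem >= p[j]:
--             rem -= p[j]
--             j += 1
--     return j == len(p)
-- ===== Notes on version B (the rewrite author's own statement) =====
-- stated objective: faster
-- what changed: Replaces A's destructive while-loop (del d[0]/del p[0], each O(len)) with a single two-pointer pass: an index j over partitions and a per-disk remaining counter; also B does not mutate its arguments where A empties both lists.
import Mathlib
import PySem

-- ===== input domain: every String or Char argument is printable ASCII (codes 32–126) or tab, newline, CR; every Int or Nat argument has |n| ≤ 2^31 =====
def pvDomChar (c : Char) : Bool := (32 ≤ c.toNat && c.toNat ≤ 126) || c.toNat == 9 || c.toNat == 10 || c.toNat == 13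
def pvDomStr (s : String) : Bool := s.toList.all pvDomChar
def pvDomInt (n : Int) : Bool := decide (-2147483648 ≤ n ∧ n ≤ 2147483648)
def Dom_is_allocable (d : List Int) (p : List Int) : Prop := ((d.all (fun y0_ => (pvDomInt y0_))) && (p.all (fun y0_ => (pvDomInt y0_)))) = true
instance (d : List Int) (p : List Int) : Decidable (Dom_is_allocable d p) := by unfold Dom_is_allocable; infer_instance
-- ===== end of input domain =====

-- B replaces A's destructive head-deletion loop with a two-pointer single pass (faster).
-- A empties both argument lists in place; B does not mutate them: the equivalence proved is about the return value only.

-- ===== PORT A =====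
-- A's while-loop as structural recursion on the pair (d, p); each iteration shrinks d.length + p.length.
def isAllocLoop : List Int → List Int → List Int × List Int
  | [], p => ([], p)
  | d, [] => (d, [])
  | x :: ds, y :: ps =>
    if x ≥ y then isAllocLoop ((x - y) :: ds) ps
    else isAllocLoop ds (y :: ps)
termination_by d p => d.length + p.length
decreasing_by all_goals (simp; try omega)

def is_allocable (d : List Int) (p : List Int) : Bool :=
  let r := isAllocLoop d p
  if r.1 = [] ∧ r.2 ≠ [] then false
  else if r.1 ≠ [] ∧ r.2 = [] then true
  else true

-- ===== PORT B =====
-- B's inner while: fit partitions (prefix of p, playing the role of index j) onto one disk.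
def fitDisk : Int → List Int → List Int
  | _, [] => []
  | rem, y :: ps => if rem ≥ y then fitDisk (rem - y) ps else y :: ps

def is_allocable_alt (d : List Int) (p : List Int) : Bool :=
  (d.foldl (fun ps disk => fitDisk disk ps) p).isEmpty
-- ===== PRECONDITION & SPEC =====
def Spec_is_allocable (d : List Int) (p : List Int) (out : Bool) : Prop := out = is_allocable_alt d p
instance (d : List Int) (p : List Int) (out : Bool) : Decidable (Spec_is_allocable d p out) := by unfold Spec_is_allocable; infer_instance

-- ===== CLAIM (what is proved, stated in full; the proofs are below) =====
def Claim_equal_is_allocable : Prop := ∀ (d : List Int) (p : List Int), Dom_is_allocable d p → Spec_is_allocable d p (is_allocable d p)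

-- ===== LEMMAS AND PROOFS =====

theorem foldl_fitDisk_nil (ds : List Int) :
    ds.foldl (fun ps disk => fitDisk disk ps) [] = [] := by
  induction ds with
  | nil => rfl
  | cons x xs ih => simpa [fitDisk] using ih

-- After the fold, what remains of p is exactly the second component of A's loop state.
theorem isAllocLoop_snd (d p : List Int) :
    (isAllocLoop d p).2 = d.foldl (fun ps disk => fitDisk disk ps) p := by
  induction d, p using isAllocLoop.induct with
  | case1 p => simp [isAllocLoop]
  | case2 d h => cases d with
    | nil => simp [isAllocLoop]
    | cons x ds => simp [isAllocLoop, fitDisk, foldl_fitDisk_nil]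
  | case3 x ds y ps hxy ih => simpa [isAllocLoop, fitDisk, hxy] using ih
  | case4 x ds y ps hxy ih => simpa [isAllocLoop, fitDisk, hxy] using ih

-- A's loop only stops when one of the two lists is exhausted.
theorem isAllocLoop_exit (d p : List Int) :
    (isAllocLoop d p).1 = [] ∨ (isAllocLoop d p).2 = [] := by
  induction d, p using isAllocLoop.induct with
  | case1 p => simp [isAllocLoop]
  | case2 d h => simp [isAllocLoop]
  | case3 x ds y ps hxy ih => simpa [isAllocLoop, hxy] using ih
  | case4 x ds y ps hxy ih => simpa [isAllocLoop, hxy] using ih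

-- ===== VERDICT (by name: the statement is the Claim_ definition above) =====
theorem is_allocable_spec : Claim_equal_is_allocable := by
  intro d p _
  unfold Spec_is_allocable is_allocable is_allocable_alt
  rw [← isAllocLoop_snd]
  rcases h2 : (isAllocLoop d p).2 with _ | ⟨y, ys⟩
  · simp [h2]
  · rcases isAllocLoop_exit d p with h1 | h1
    · simp [h1, h2]
    · simp [h2] at h1
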